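-- pv_equiv track=rewrite | github.com/joshanashakya/dissertation | workspace/dataset/java-python/GeeksForGeeks/2071/A/2.py | find_Sum
-- ===== SOURCE A (Python) =====
-- MAX = 100005
--
-- def addPrimes():
--     n = MAX
--
--     prime = [True for i in range(n + 1)]
--
--     for p in range(2, n + 1):
--
--         if p * p > n:
--             break
--
--         if (prime[p] == True):
--             for i in range(2 * p, n + 1, p):
--                 prime[i] = False
--
--     ans = []
--
--     # Store all prime numbers
--     for p in range(2, n + 1):
--         if (prime[p]):
--             ans.append(p)
--
--     return ans
--
-- def is_prime(n):
--     if n in [3, 5, 7]: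
--         return True
--     return False
--
-- def find_Sum(n):
--
--     # To store required answer
--     Sum = 0
--
--     # Get all prime numbers
--     v = addPrimes()
--
--     # Traverse through all the prime numbers
--     for i in range(len(v)):
--
--         # Flag stores 1 if a number does
--         # not contain any odd primes
--         flag = 1
--         a = v[i]
--
--         # Find all digits of a number
--         while (a != 0):
--
--             d = a % 10;
--             a = a // 10;
--             if (is_prime(d)):
--                 flag = 0
--                 break
--
--         # If number does not contain any odd primes
--         if (flag == 1):
--             n -= 1
--             Sum = Sum + v[i]
--         if n == 0:
--             break
--
--     # Return the required answer
--     return Sum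
--
-- n = 7
-- ===== SOURCE B (Python) =====
-- MAX = 100005
--
-- def _is_prime_td(k):
--     d = 2
--     while d * d <= k:
--         if k % d == 0:
--             return False
--         d += 1
--     return True
--
-- def _has_bad_digit(x):
--     return x != 0 and (x % 10 in (3, 5, 7) or _has_bad_digit(x // 10))
--
-- def find_Sum(n):
--     total = 0
--     for k in range(2, MAX + 1):
--         if _is_prime_td(k):
--             if not _has_bad_digit(k):
--                 total += k
--                 n -= 1
--                 if n == 0:
--                     break
--     return total
-- ===== Notes on version B (the rewrite author's own statement) =====
-- stated objective: alternative
-- what changed: Replaces the precomputed Eratosthenes sieve + indexed scan over the prime list with a single streaming loop that tests each candidate by trial division up to sqrt(k) and checks digits by a recursive predicate, stopping as soon as n qualifying primes are summed.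
import Mathlib
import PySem

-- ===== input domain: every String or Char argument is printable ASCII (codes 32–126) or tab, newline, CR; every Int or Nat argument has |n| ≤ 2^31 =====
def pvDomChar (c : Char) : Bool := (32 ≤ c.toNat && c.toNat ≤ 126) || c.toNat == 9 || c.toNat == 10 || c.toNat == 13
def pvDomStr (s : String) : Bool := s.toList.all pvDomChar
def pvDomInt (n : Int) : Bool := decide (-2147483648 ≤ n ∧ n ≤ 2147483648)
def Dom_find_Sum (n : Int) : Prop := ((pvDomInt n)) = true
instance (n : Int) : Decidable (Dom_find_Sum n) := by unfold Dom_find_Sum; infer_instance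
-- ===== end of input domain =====

-- B replaces A's precomputed Eratosthenes sieve + scan of the stored prime list by a single
-- streaming loop with trial-division primality and a recursive digit test (alternative algorithm,
-- same return value everywhere).

-- ===== PORT A =====

def pvMAX : Nat := 100005

-- for i in range(2*p, n+1, p): prime[i] = False   (i steps by p while i ≤ MAX)
def pvMarkFrom (a : Array Bool) (p i : Nat) : Array Bool :=
  if _h : i ≤ pvMAX ∧ 0 < p then pvMarkFrom (a.set! i false) p (i + p)
  else a
termination_by pvMAX + 1 - i
decreasing_by omega

-- for p in range(2, MAX+1): if p*p > MAX: break; if prime[p]: mark multiples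
def pvSieveLoop (a : Array Bool) (p : Nat) : Array Bool :=
  if _h : p ≤ pvMAX then
    if pvMAX < p * p then a
    else pvSieveLoop (if a.getD p false then pvMarkFrom a p (2 * p) else a) (p + 1)
  else a
termination_by pvMAX + 1 - p

def pvAddPrimes : List Nat :=
  let prime := pvSieveLoop (Array.replicate (pvMAX + 1) true) 2
  (List.range' 2 (pvMAX - 1)).filter (fun p => prime.getD p false)

def pvIs_prime (d : Nat) : Bool := [3, 5, 7].contains d

-- while a != 0: d = a % 10; a = a // 10; if is_prime(d): flag = 0; break   (returns flag)
def pvFlagLoop (a : Nat) : Nat :=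
  if a ≠ 0 then
    if pvIs_prime (a % 10) then 0 else pvFlagLoop (a / 10)
  else 1
decreasing_by exact Nat.div_lt_self (by omega) (by omega)

def pvFindLoop (v : List Nat) (n Sum : Int) : Int :=
  match v with
  | [] => Sum
  | a :: rest =>
    let s := if pvFlagLoop a = 1 then (n - 1, Sum + (a : Int)) else (n, Sum)
    if s.1 = 0 then s.2 else pvFindLoop rest s.1 s.2

def find_Sum (n : Int) : Int := pvFindLoop pvAddPrimes n 0

-- ===== PORT B =====
-- d = 2; while d*d <= k: if k % d == 0: return False; d += 1; return True
def pvTDLoop (k d : Nat) : Bool :=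
  if d * d ≤ k then
    if k % d = 0 then false else pvTDLoop k (d + 1)
  else true
termination_by k + 1 - d
decreasing_by
  have hd : d ≤ d * d := by nlinarith
  omega

def pvIsPrimeTD (k : Nat) : Bool := pvTDLoop k 2

def pvHasBadDigit (x : Nat) : Bool :=
  if x = 0 then false
  else (decide (x % 10 = 3) || decide (x % 10 = 5) || decide (x % 10 = 7)) || pvHasBadDigit (x / 10)
decreasing_by exact Nat.div_lt_self (by omega) (by omega)

def pvBLoop (k : Nat) (n total : Int) : Int :=
  if _h : k ≤ pvMAX then
    if pvIsPrimeTD k then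
      if !pvHasBadDigit k then
        if n - 1 = 0 then total + (k : Int)
        else pvBLoop (k + 1) (n - 1) (total + (k : Int))
      else pvBLoop (k + 1) n total
    else pvBLoop (k + 1) n total
  else total
termination_by pvMAX + 1 - k

def find_Sum_alt (n : Int) : Int := pvBLoop 2 n 0


-- ===== PRECONDITION & SPEC =====
def Spec_find_Sum (n : Int) (out : Int) : Prop := out = find_Sum_alt n
instance (n : Int) (out : Int) : Decidable (Spec_find_Sum n out) := by unfold Spec_find_Sum; infer_instance

-- ===== CLAIM (what is proved, stated in full; the proofs are below) =====
def Claim_equal_find_Sum : Prop := ∀ (n : Int), Dom_find_Sum n → Spec_find_Sum n (find_Sum n)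

-- ===== LEMMAS AND PROOFS =====

theorem pvArray_getD_set! (a : Array Bool) (i k : Nat) (v d : Bool) :
    (a.set! i v).getD k d = if i = k ∧ k < a.size then v else a.getD k d := by
  simp only [Array.getD_eq_getD_getElem?, Array.set!, Array.getElem?_setIfInBounds]
  split_ifs with h1 h2 h2 <;> simp_all

theorem pvMarkFrom_size (a : Array Bool) (p i : Nat) :
    (pvMarkFrom a p i).size = a.size := by
  fun_induction pvMarkFrom a p i with
  | case1 a i h ih => rw [ih]; simp
  | case2 => rfl

theorem pvMarkFrom_getD (a : Array Bool) (p i k : Nat) (hp : 0 < p)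
    (hlen : a.size = pvMAX + 1) (hk : k ≤ pvMAX) :
    (pvMarkFrom a p i).getD k false =
      if i ≤ k ∧ p ∣ (k - i) then false else a.getD k false := by
  fun_induction pvMarkFrom a p i with
  | case1 a i h ih =>
      rw [ih (by simpa using hlen)]
      by_cases hki : k = i
      · subst hki
        have h1 : ¬ (k + p ≤ k ∧ p ∣ (k - (k + p))) := by omega
        have h2 : (k ≤ k ∧ p ∣ (k - k)) := ⟨le_refl _, by simp⟩
        rw [if_neg h1, if_pos h2, pvArray_getD_set!]
        rw [if_pos ⟨rfl, by omega⟩]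
      · have hset : (a.set! i false).getD k false = a.getD k false := by
          rw [pvArray_getD_set!, if_neg (by omega)]
        rw [hset]
        congr 1
        simp only [eq_iff_iff]
        constructor
        · rintro ⟨h1, c, hc⟩
          have he : p * (c + 1) = p * c + p := by ring
          exact ⟨by omega, ⟨c + 1, by omega⟩⟩
        · rintro ⟨h1, c, hc⟩
          rcases c with _ | c
          · omega
          · have he : p * (c + 1) = p * c + p := by ring
            exact ⟨by omega, ⟨c, by omega⟩⟩
  | case2 a i h =>
      have : ¬ (i ≤ k ∧ p ∣ (k - i)) := by omega
      rw [if_neg this]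
def pvM (b k : Nat) : Prop := ∃ q, 2 ≤ q ∧ q < b ∧ Nat.Prime q ∧ q ∣ k ∧ 2 * q ≤ k

theorem pvM_of_not_prime (k : Nat) (hk2 : 2 ≤ k) (hnp : ¬ Nat.Prime k) :
    ∃ q, 2 ≤ q ∧ Nat.Prime q ∧ q ∣ k ∧ 2 * q ≤ k ∧ q * q ≤ k := by
  have hq : Nat.Prime k.minFac := Nat.minFac_prime (by omega)
  have hd : k.minFac ∣ k := Nat.minFac_dvd k
  have hsq : k.minFac * k.minFac ≤ k := by
    have := Nat.minFac_sq_le_self (by omega) hnp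
    simpa [pow_two] using this
  have h2 : 2 ≤ k.minFac := hq.two_le
  refine ⟨k.minFac, h2, hq, hd, ?_, hsq⟩
  obtain ⟨c, hc⟩ := hd
  rcases c with _ | _ | c
  · omega
  · exfalso; exact hnp (by rw [hc, Nat.mul_one]; exact hq)
  · nlinarith
theorem pvNotM_prime (b k : Nat) (hk : Nat.Prime k) : ¬ pvM b k := by
  rintro ⟨q, h2q, _, hq, hdvd, h2qk⟩
  rcases (Nat.Prime.eq_one_or_self_of_dvd hk q hdvd) with h | h <;> omega

theorem pvNotM_iff_prime (b k : Nat) (hk2 : 2 ≤ k) (hk : k ≤ pvMAX)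
    (hb : pvMAX < b * b ∨ pvMAX < b) : (¬ pvM b k ↔ Nat.Prime k) := by
  constructor
  · intro hnm
    by_contra hnp
    obtain ⟨q, h2, hq, hd, h2q, hsq⟩ := pvM_of_not_prime k hk2 hnp
    refine hnm ⟨q, h2, ?_, hq, hd, h2q⟩
    rcases hb with hb | hb
    · by_contra hqb
      have : b * b ≤ q * q := Nat.mul_le_mul (by omega) (by omega)
      omega
    · nlinarith
  · exact pvNotM_prime b k

theorem pvNotM_self_iff_prime (p : Nat) (hp : 2 ≤ p) : (¬ pvM p p ↔ Nat.Prime p) := by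
  constructor
  · intro hnm
    by_contra hnp
    obtain ⟨q, h2, hq, hd, h2q, hsq⟩ := pvM_of_not_prime p hp hnp
    exact hnm ⟨q, h2, by nlinarith, hq, hd, h2q⟩
  · exact pvNotM_prime p p
def pvInv (b : Nat) (a : Array Bool) : Prop :=
  a.size = pvMAX + 1 ∧ ∀ k, k ≤ pvMAX → ((a.getD k false = true) ↔ ¬ pvM b k)

theorem pvInv_step (p : Nat) (l : Array Bool) (hp : 2 ≤ p) (hple : p ≤ pvMAX)
    (hinv : pvInv p l) :
    pvInv (p + 1) (if l.getD p false then pvMarkFrom l p (2 * p) else l) := by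
  have hlp : l.getD p false = true ↔ Nat.Prime p :=
    (hinv.2 p hple).trans (pvNotM_self_iff_prime p hp)
  by_cases hP : Nat.Prime p
  · rw [if_pos (hlp.mpr hP)]
    refine ⟨by rw [pvMarkFrom_size, hinv.1], ?_⟩
    intro k hk
    rw [pvMarkFrom_getD l p (2 * p) k (by omega) hinv.1 hk]
    by_cases hc : 2 * p ≤ k ∧ p ∣ (k - 2 * p)
    · rw [if_pos hc]
      simp only [Bool.false_eq_true, false_iff, not_not]
      have hdk : p ∣ k := by
        obtain ⟨c, hc2⟩ := hc.2
        have he : p * (c + 2) = p * c + 2 * p := by ring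
        exact ⟨c + 2, by omega⟩
      exact ⟨p, hp, by omega, hP, hdk, hc.1⟩
    · rw [if_neg hc, hinv.2 k hk]
      have hM : pvM (p + 1) k ↔ pvM p k := by
        constructor
        · rintro ⟨q, h2, hqb, hq, hd, h2q⟩
          rcases Nat.lt_succ_iff_lt_or_eq.mp hqb with h | h
          · exact ⟨q, h2, h, hq, hd, h2q⟩
          · subst h
            exact absurd ⟨h2q, Nat.dvd_sub hd (Dvd.intro 2 (by ring))⟩ hc
        · rintro ⟨q, h2, hqb, hq, hd, h2q⟩
          exact ⟨q, h2, by omega, hq, hd, h2q⟩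
      rw [hM]
  · have hfalse : ¬ (l.getD p false = true) := fun hb => hP (hlp.mp hb)
    rw [if_neg hfalse]
    refine ⟨hinv.1, ?_⟩
    intro k hk
    rw [hinv.2 k hk]
    have hM : pvM (p + 1) k ↔ pvM p k := by
      constructor
      · rintro ⟨q, h2, hqb, hq, hd, h2q⟩
        rcases Nat.lt_succ_iff_lt_or_eq.mp hqb with h | h
        · exact ⟨q, h2, h, hq, hd, h2q⟩
        · subst h; exact absurd hq hP
      · rintro ⟨q, h2, hqb, hq, hd, h2q⟩
        exact ⟨q, h2, by omega, hq, hd, h2q⟩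
    rw [hM]

theorem pvSieveLoop_char : ∀ (l : Array Bool) (p : Nat), 2 ≤ p → pvInv p l →
    ∀ k, 2 ≤ k → k ≤ pvMAX →
      ((pvSieveLoop l p).getD k false = true ↔ Nat.Prime k) := by
  intro l p
  fun_induction pvSieveLoop l p with
  | case1 l p hle hbr =>
      intro hp hinv k hk2 hk
      exact (hinv.2 k hk).trans (pvNotM_iff_prime p k hk2 hk (Or.inl hbr))
  | case2 l p hle hbr ih =>
      intro hp hinv k hk2 hk
      exact ih (by omega) (pvInv_step p l hp hle hinv) k hk2 hk
  | case3 l p hle =>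
      intro hp hinv k hk2 hk
      exact (hinv.2 k hk).trans (pvNotM_iff_prime p k hk2 hk (Or.inr (by omega)))

theorem pvSievePrime_char :
    ∀ k, 2 ≤ k → k ≤ pvMAX →
      ((pvSieveLoop (Array.replicate (pvMAX + 1) true) 2).getD k false = true ↔ Nat.Prime k) := by
  apply pvSieveLoop_char _ _ (by omega)
  refine ⟨by simp, ?_⟩
  intro k hk
  have : (Array.replicate (pvMAX + 1) true).getD k false = true := by
    simp [Array.getD_eq_getD_getElem?, Nat.lt_succ_of_le hk]
  rw [this]
  simp only [true_iff]
  rintro ⟨q, h2, hqb, _⟩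
  omega
theorem pvTDLoop_iff : ∀ (k d : Nat), 1 ≤ d →
    (pvTDLoop k d = true ↔ ∀ e, d ≤ e → e * e ≤ k → ¬ e ∣ k) := by
  intro k d
  fun_induction pvTDLoop k d with
  | case1 d hle hdvd =>
      intro hd
      simp only [Bool.false_eq_true, false_iff, not_forall]
      refine ⟨d, ?_⟩
      simp only [not_not]
      exact ⟨le_refl d, hle, Nat.dvd_of_mod_eq_zero hdvd⟩
  | case2 d hle hdvd ih =>
      intro hd
      rw [ih (by omega)]
      constructor
      · intro h e he hsq
        rcases Nat.eq_or_lt_of_le he with h1 | h1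
        · subst h1
          intro hdk
          exact hdvd (Nat.mod_eq_zero_of_dvd hdk)
        · exact h e h1 hsq
      · intro h e he hsq
        exact h e (by omega) hsq
  | case3 d hle =>
      intro hd
      simp only [true_iff]
      intro e he hsq hdk
      have : d * d ≤ e * e := Nat.mul_le_mul he he
      omega

theorem pvIsPrimeTD_iff (k : Nat) (hk : 2 ≤ k) : (pvIsPrimeTD k = true ↔ Nat.Prime k) := by
  rw [pvIsPrimeTD, pvTDLoop_iff k 2 (by omega), Nat.prime_def_le_sqrt]
  constructor
  · intro h
    refine ⟨hk, fun m h2 hms => h m h2 (Nat.le_sqrt.mp hms)⟩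
  · intro ⟨_, h⟩ e he hsq
    exact h e he (Nat.le_sqrt.mpr hsq)

theorem pvFlag_iff_bad : ∀ a : Nat, (pvFlagLoop a = 1 ↔ pvHasBadDigit a = false) := by
  intro a
  fun_induction pvFlagLoop a with
  | case1 a ha hbad =>
      rw [pvHasBadDigit]
      simp only [if_neg ha]
      have : (decide (a % 10 = 3) || decide (a % 10 = 5) || decide (a % 10 = 7)) = true := by
        simpa [pvIs_prime, List.contains_eq_mem, Bool.or_assoc] using hbad
      simp [this]
  | case2 a ha hbad ih =>
      rw [pvHasBadDigit]
      simp only [if_neg ha]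
      have : (decide (a % 10 = 3) || decide (a % 10 = 5) || decide (a % 10 = 7)) = false := by
        simpa [pvIs_prime, List.contains_eq_mem, Bool.or_assoc] using hbad
      simp [this, ih]
  | case3 a ha =>
      have : a = 0 := by omega
      subst this
      simp [pvHasBadDigit]
theorem pvLoop_eq : ∀ (k : Nat) (n S : Int), 2 ≤ k →
    (n ≠ 0 ∨ (pvIsPrimeTD k && !pvHasBadDigit k) = true) →
    pvFindLoop ((List.range' k (pvMAX + 1 - k)).filter
        (fun p => (pvSieveLoop (Array.replicate (pvMAX + 1) true) 2).getD p false)) n S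
      = pvBLoop k n S := by
  intro k n S
  fun_induction pvBLoop k n S with
  | case1 k n S hle hprime hgood hn1 =>
      intro hk hn
      have hsplit : pvMAX + 1 - k = (pvMAX - k) + 1 := by omega
      rw [hsplit, List.range'_succ, List.filter_cons]
      have hpred : (pvSieveLoop (Array.replicate (pvMAX + 1) true) 2).getD k false = true :=
        (pvSievePrime_char k hk hle).mpr ((pvIsPrimeTD_iff k hk).mp hprime)
      rw [if_pos hpred]
      have hflag : pvFlagLoop k = 1 := (pvFlag_iff_bad k).mpr (by simpa using hgood)
      rw [pvFindLoop]
      simp [hflag, hn1]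
  | case2 k n S hle hprime hgood hn1 ih =>
      intro hk hn
      have hsplit : pvMAX + 1 - k = (pvMAX - k) + 1 := by omega
      rw [hsplit, List.range'_succ, List.filter_cons]
      have hpred : (pvSieveLoop (Array.replicate (pvMAX + 1) true) 2).getD k false = true :=
        (pvSievePrime_char k hk hle).mpr ((pvIsPrimeTD_iff k hk).mp hprime)
      rw [if_pos hpred]
      have hflag : pvFlagLoop k = 1 := (pvFlag_iff_bad k).mpr (by simpa using hgood)
      have hrw : pvMAX - k = pvMAX + 1 - (k + 1) := by omega
      rw [hrw, pvFindLoop]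
      simp only [hflag, if_true, if_neg hn1]
      exact ih (by omega) (Or.inl hn1)
  | case3 k n S hle hprime hgood ih =>
      intro hk hn
      have hn0 : n ≠ 0 := by
        rcases hn with hn | hn
        · exact hn
        · rw [Bool.and_eq_true, hprime] at hn
          simp at hn
          exact absurd hn (by simpa using hgood)
      have hsplit : pvMAX + 1 - k = (pvMAX - k) + 1 := by omega
      rw [hsplit, List.range'_succ, List.filter_cons]
      have hpred : (pvSieveLoop (Array.replicate (pvMAX + 1) true) 2).getD k false = true :=
        (pvSievePrime_char k hk hle).mpr ((pvIsPrimeTD_iff k hk).mp hprime)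
      rw [if_pos hpred]
      have hflag : pvFlagLoop k ≠ 1 := by
        intro hf
        exact absurd ((pvFlag_iff_bad k).mp hf) (by simpa using hgood)
      have hrw : pvMAX - k = pvMAX + 1 - (k + 1) := by omega
      rw [hrw, pvFindLoop]
      simp only [if_neg hflag, if_neg hn0]
      exact ih (by omega) (Or.inl hn0)
  | case4 k n S hle hprime ih =>
      intro hk hn
      have hn0 : n ≠ 0 := by
        rcases hn with hn | hn
        · exact hn
        · rw [Bool.and_eq_true] at hn
          exact absurd hn.1 (by simpa using hprime)
      have hsplit : pvMAX + 1 - k = (pvMAX - k) + 1 := by omega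
      rw [hsplit, List.range'_succ, List.filter_cons]
      have hpred : (pvSieveLoop (Array.replicate (pvMAX + 1) true) 2).getD k false = false := by
        have h1 := pvSievePrime_char k hk hle
        have h2 : ¬ Nat.Prime k := fun hP => by
          have := (pvIsPrimeTD_iff k hk).mpr hP
          simp [this] at hprime
        cases hb : (pvSieveLoop (Array.replicate (pvMAX + 1) true) 2).getD k false
        · rfl
        · exact absurd (h1.mp hb) h2
      rw [if_neg (by rw [hpred]; simp)]
      have hrw : pvMAX - k = pvMAX + 1 - (k + 1) := by omega
      rw [hrw]
      exact ih (by omega) (Or.inl hn0)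
  | case5 k n S hle =>
      intro hk hn
      have : pvMAX + 1 - k = 0 := by omega
      rw [this]
      simp [pvFindLoop]
theorem pvAddPrimes_eq : pvAddPrimes =
    (List.range' 2 (pvMAX + 1 - 2)).filter
      (fun p => (pvSieveLoop (Array.replicate (pvMAX + 1) true) 2).getD p false) := by
  have h : pvMAX - 1 = pvMAX + 1 - 2 := by norm_num [pvMAX]
  rw [pvAddPrimes]
  rw [h]

theorem find_Sum_eq (n : Int) : find_Sum n = find_Sum_alt n := by
  rw [find_Sum, find_Sum_alt, pvAddPrimes_eq]
  by_cases hn : n = 0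
  · subst hn
    have h1 : pvIsPrimeTD 2 = true := by simp [pvIsPrimeTD, pvTDLoop]
    have h2 : pvHasBadDigit 2 = false := by simp [pvHasBadDigit]
    exact pvLoop_eq 2 0 0 (by omega) (Or.inr (by rw [h1, h2]; rfl))
  · exact pvLoop_eq 2 n 0 (by omega) (Or.inl hn)

-- ===== VERDICT (by name: the statement is the Claim_ definition above) =====
theorem find_Sum_spec : Claim_equal_find_Sum := by
  intro n _
  unfold Spec_find_Sum
  exact find_Sum_eq n
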